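-- pv_equiv track=rewrite | github.com/CaioBeraldo/WebsiteAcademia | FitSTRfront/fox/js/Untitled-2.py | calcular_preco_maximo_por_armazem
-- ===== SOURCE A (Python) =====
-- def calcular_preco_maximo_por_armazem(matriz_estoque, vetor_precos):
--     precos_maximos = []
--     for coluna in range(len(matriz_estoque[0])):
--         estoques_armazem = [linha[coluna] for linha in matriz_estoque]
--         indice_maximo = estoques_armazem.index(max(estoques_armazem))
--         preco_maximo = vetor_precos[indice_maximo]
--         precos_maximos.append(preco_maximo)
--     return precos_maximos
-- ===== SOURCE B (Python) =====
-- def calcular_preco_maximo_por_armazem(matriz_estoque, vetor_precos):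
--     melhores = [(estoque, 0) for estoque in matriz_estoque[0]]
--     for i, linha in enumerate(matriz_estoque[1:], 1):
--         melhores = [(v, i) if v > melhor else (melhor, indice)
--                     for v, (melhor, indice) in zip(linha, melhores)]
--     return [vetor_precos[indice] for _, indice in melhores]
-- ===== Notes on version B (the rewrite author's own statement) =====
-- stated objective: alternative
-- what changed: B replaces A's column-outer strategy (build each column as a list, then max() plus .index() plus price lookup per column) by a single row-major forward pass that maintains per-column running (best value, first best row index) pairs via zip, mapping the recorded indices through vetor_precos at the end.
import Mathlib
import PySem

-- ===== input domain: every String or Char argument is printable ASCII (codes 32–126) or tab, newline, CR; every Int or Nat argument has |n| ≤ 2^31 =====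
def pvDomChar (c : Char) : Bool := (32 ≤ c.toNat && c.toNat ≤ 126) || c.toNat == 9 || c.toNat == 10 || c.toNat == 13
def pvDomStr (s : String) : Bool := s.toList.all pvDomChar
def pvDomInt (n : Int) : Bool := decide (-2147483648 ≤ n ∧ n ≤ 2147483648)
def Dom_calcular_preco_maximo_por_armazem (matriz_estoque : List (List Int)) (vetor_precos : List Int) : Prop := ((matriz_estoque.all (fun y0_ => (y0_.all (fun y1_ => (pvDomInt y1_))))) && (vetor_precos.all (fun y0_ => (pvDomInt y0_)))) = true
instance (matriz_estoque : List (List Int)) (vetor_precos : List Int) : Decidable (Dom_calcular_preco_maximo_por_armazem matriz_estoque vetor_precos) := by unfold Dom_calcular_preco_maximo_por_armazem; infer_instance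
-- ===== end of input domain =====

-- B replaces A's per-column build-list/max/.index passes by one row-major pass keeping
-- running (best value, first best row index) pairs per column (objective: alternative).

-- ===== PORT A =====
def calcular_preco_maximo_por_armazem (matriz_estoque : List (List Int)) (vetor_precos : List Int) : List Int :=
  (PySem.List.pyRange 0 ((matriz_estoque.headD []).length : Int) 1).foldl
    (fun precos_maximos coluna =>
      let estoques_armazem := matriz_estoque.map (fun linha => (PySem.List.pyGet? linha coluna).getD 0)
      let indice_maximo := (PySem.List.index? estoques_armazem ((PySem.List.max? estoques_armazem (fun y => y)).getD 0)).getD 0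
      let preco_maximo := (PySem.List.pyGet? vetor_precos (indice_maximo : Int)).getD 0
      precos_maximos ++ [preco_maximo]) []

-- ===== PORT B =====
def calcular_preco_maximo_por_armazem_alt (matriz_estoque : List (List Int)) (vetor_precos : List Int) : List Int :=
  let melhores0 : List (Int × Int) := (matriz_estoque.headD []).map (fun estoque => (estoque, (0 : Int)))
  let melhores := (PySem.List.enumerate (PySem.List.slice matriz_estoque (some 1) none) 1).foldl
    (fun melhores il =>
      List.zipWith (fun v mi => if v > mi.1 then (v, il.1) else mi) il.2 melhores) melhores0
  melhores.map (fun mi => (PySem.List.pyGet? vetor_precos mi.2).getD 0)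

-- ===== PRECONDITION & SPEC =====
-- helper for Pre_: matrix entry (row k, column j), 0 outside (inside Pre_'s shape bounds it is the real entry)
def pvVal (m : List (List Int)) (k j : Nat) : Int := (m.getD k []).getD j 0

-- Pre_ = exactly where Python A returns: matrix nonempty, every row at least as long as the
-- first (else linha[coluna] raises IndexError), and for every column the first row index
-- attaining the column maximum is a valid index of vetor_precos (else it raises IndexError).
def Pre_calcular_preco_maximo_por_armazem (matriz_estoque : List (List Int)) (vetor_precos : List Int) : Prop :=
  matriz_estoque ≠ [] ∧
  (∀ linha ∈ matriz_estoque, (matriz_estoque.headD []).length ≤ linha.length) ∧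
  (∀ j < (matriz_estoque.headD []).length, ∃ i < matriz_estoque.length, i < vetor_precos.length ∧
      (∀ k < matriz_estoque.length, pvVal matriz_estoque k j ≤ pvVal matriz_estoque i j) ∧
      (∀ k < i, pvVal matriz_estoque k j < pvVal matriz_estoque i j))
instance (matriz_estoque : List (List Int)) (vetor_precos : List Int) : Decidable (Pre_calcular_preco_maximo_por_armazem matriz_estoque vetor_precos) := by unfold Pre_calcular_preco_maximo_por_armazem; infer_instance

def pvWitness_calcular_preco_maximo_por_armazem : List (List Int) × List Int := ([[3, 1], [2, 5]], [10, 20])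

def Spec_calcular_preco_maximo_por_armazem (matriz_estoque : List (List Int)) (vetor_precos : List Int) (out : List Int) : Prop := out = calcular_preco_maximo_por_armazem_alt matriz_estoque vetor_precos
instance (matriz_estoque : List (List Int)) (vetor_precos : List Int) (out : List Int) : Decidable (Spec_calcular_preco_maximo_por_armazem matriz_estoque vetor_precos out) := by unfold Spec_calcular_preco_maximo_por_armazem; infer_instance

-- ===== CLAIM (what is proved, stated in full; the proofs are below) =====
def Claim_equal_calcular_preco_maximo_por_armazem : Prop := ∀ (matriz_estoque : List (List Int)) (vetor_precos : List Int), Dom_calcular_preco_maximo_por_armazem matriz_estoque vetor_precos → Pre_calcular_preco_maximo_por_armazem matriz_estoque vetor_precos → Spec_calcular_preco_maximo_por_armazem matriz_estoque vetor_precos (calcular_preco_maximo_por_armazem matriz_estoque vetor_precos)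

-- ===== LEMMAS AND PROOFS =====

-- the column j of the matrix, as A extracts it
def pvCol (m : List (List Int)) (j : Nat) : List Int :=
  m.map (fun linha => (PySem.List.pyGet? linha (j : Int)).getD 0)

-- running (best value, first best index) scan over a column, starting from pair pr at index i
def pvScan (pr : Int × Int) (i : Int) : List Int → Int × Int
  | [] => pr
  | y :: ys => pvScan (if y > pr.1 then (y, i) else pr) (i + 1) ys

lemma pvScan_snoc (ys : List Int) : ∀ (pr : Int × Int) (i v : Int),
    pvScan pr i (ys ++ [v]) =
      (if v > (pvScan pr i ys).1 then (v, i + (ys.length : Int)) else pvScan pr i ys) := by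
  induction ys with
  | nil => intro pr i v; simp [pvScan]
  | cons y ys ih =>
      intro pr i v
      simp only [List.cons_append, pvScan, ih]
      have : i + 1 + (ys.length : Int) = i + ((ys.length + 1 : Nat) : Int) := by omega
      simp [this]

-- the scan computes the maximum and its first index
lemma pvScan_spec (t : List Int) (x : Int) :
    PySem.List.max? (x :: t) (fun y => y) = some (pvScan (x, 0) 1 t).1 ∧
    ∃ k : Nat, (pvScan (x, 0) 1 t).2 = (k : Int) ∧
      PySem.List.index? (x :: t) (pvScan (x, 0) 1 t).1 = some k := by
  induction t using List.reverseRecOn with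
  | nil =>
      refine ⟨by simp [PySem.List.max?_id_cons, pvScan], 0, by simp [pvScan], ?_⟩
      simp [pvScan]
  | append_singleton ts v ih =>
      obtain ⟨hmax, k, hk, hidx⟩ := ih
      have hfold : (pvScan (x, 0) 1 ts).1 = ts.foldl max x := by
        have := hmax; rw [PySem.List.max?_id_cons] at this; exact (Option.some.inj this).symm
      rw [pvScan_snoc]
      by_cases hv : v > (pvScan (x, 0) 1 ts).1
      · constructor
        · rw [PySem.List.max?_id_cons]
          simp only [List.foldl_append, List.foldl_cons, List.foldl_nil, ← hfold]
          simp [max_eq_right (le_of_lt hv), hv]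
        · refine ⟨ts.length + 1, by simp [hv]; omega, ?_⟩
          have hnotmem : v ∉ x :: ts := by
            intro hmem
            have := PySem.List.max?_isMax hmax v hmem
            simp at this; omega
          rw [if_pos hv]
          show PySem.List.index? ((x :: ts) ++ [v]) v = some (ts.length + 1)
          rw [PySem.List.index?_append_singleton_self (x :: ts) v hnotmem]
          simp
      · constructor
        · rw [PySem.List.max?_id_cons]
          simp only [List.foldl_append, List.foldl_cons, List.foldl_nil, ← hfold]
          simp at hv
          simp [max_eq_left hv, if_neg (by omega : ¬ v > (pvScan (x,0) 1 ts).1)]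
        · refine ⟨k, by simp [hv] at *; omega, ?_⟩
          have hmem : (pvScan (x, 0) 1 ts).1 ∈ x :: ts := PySem.List.max?_mem hmax
          rw [if_neg hv]
          show PySem.List.index? ((x :: ts) ++ [v]) (pvScan (x, 0) 1 ts).1 = some k
          rw [PySem.List.index?_append_of_mem _ hmem, hidx]

lemma pvMap_range_getD {α : Type} (xs : List α) (d : α) :
    (List.range xs.length).map (fun j => xs.getD j d) = xs := by
  apply List.ext_getElem
  · simp
  · intro i h1 h2
    simp [List.getD_eq_getElem?_getD, List.getElem?_eq_getElem h2]

-- B's row fold computes, per column, the scan over that column of the remaining rows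
lemma pvB_fold (rest : List (List Int)) : ∀ (i : Int) (mel : List (Int × Int)),
    (∀ linha ∈ rest, mel.length ≤ linha.length) →
    (PySem.List.enumerate rest i).foldl
      (fun mel il => List.zipWith (fun v mi => if v > mi.1 then (v, il.1) else mi) il.2 mel) mel
    = (List.range mel.length).map (fun j => pvScan (mel.getD j (0, 0)) i (pvCol rest j)) := by
  induction rest with
  | nil =>
      intro i mel _
      simp only [PySem.List.enumerate_nil, List.foldl_nil, pvCol, List.map_nil, pvScan]
      exact (pvMap_range_getD mel (0, 0)).symm
  | cons r rest ih =>
      intro i mel hlen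
      rw [PySem.List.enumerate_cons, List.foldl_cons]
      have hr : mel.length ≤ r.length := hlen r (by simp)
      have hlen' : (List.zipWith (fun v mi => if v > mi.1 then (v, i) else mi) r mel).length = mel.length := by
        simp [List.length_zipWith]; omega
      rw [ih (i + 1) _ (by intro l hl; rw [hlen']; exact hlen l (by simp [hl]))]
      rw [hlen']
      apply List.map_congr_left
      intro j hj
      rw [List.mem_range] at hj
      have hjr : j < r.length := lt_of_lt_of_le hj hr
      have hz : (List.zipWith (fun v mi => if v > mi.1 then (v, i) else mi) r mel).getD j (0, 0)
          = (if r[j] > (mel.getD j (0, 0)).1 then (r[j], i) else mel.getD j (0, 0)) := by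
        have h1 : mel.getD j (0, 0) = mel[j] := List.getD_eq_getElem mel (0,0) hj
        rw [List.getD_eq_getElem _ (0,0) (by omega), List.getElem_zipWith, h1]
      have hcol : pvCol (r :: rest) j = r[j] :: pvCol rest j := by
        simp [pvCol, PySem.List.pyGet?_natCast, List.getElem?_eq_getElem hjr]
      rw [hcol, hz, pvScan]

lemma pvA_eq (m : List (List Int)) (p : List Int) :
    calcular_preco_maximo_por_armazem m p
    = (List.range (m.headD []).length).map (fun j =>
        (PySem.List.pyGet? p
          (((PySem.List.index? (pvCol m j) ((PySem.List.max? (pvCol m j) (fun y => y)).getD 0)).getD 0 : Nat) : Int)).getD 0) := by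
  unfold calcular_preco_maximo_por_armazem
  rw [PySem.List.foldl_append_singleton_eq_map, PySem.List.pyRange_one]
  simp [List.map_map, pvCol, Function.comp]

-- ===== VERDICT (by name: the statement is the Claim_ definition above) =====
theorem calcular_preco_maximo_por_armazem_spec : Claim_equal_calcular_preco_maximo_por_armazem := by
  intro m p _ hPre
  obtain ⟨hne, hrows, -⟩ := hPre
  obtain ⟨r0, rest, rfl⟩ : ∃ r0 rest, m = r0 :: rest := by
    cases m with | nil => exact absurd rfl hne | cons a b => exact ⟨a, b, rfl⟩
  unfold Spec_calcular_preco_maximo_por_armazem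
  rw [pvA_eq]
  unfold calcular_preco_maximo_por_armazem_alt
  simp only [List.headD_cons, PySem.List.slice_from_one, List.tail_cons]
  rw [pvB_fold rest 1 (r0.map (fun e => (e, (0 : Int))))
        (by intro l hl; simpa using hrows l (by simp [hl]))]
  simp only [List.length_map, List.map_map]
  apply List.map_congr_left
  intro j hj
  rw [List.mem_range] at hj
  have hget : (r0.map (fun e => (e, (0 : Int)))).getD j (0, 0) = (r0[j], (0 : Int)) := by
    rw [List.getD_eq_getElem _ (0,0) (by simpa using hj)]
    simp
  have hcol : pvCol (r0 :: rest) j = r0[j] :: pvCol rest j := by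
    simp [pvCol, PySem.List.pyGet?_natCast, List.getElem?_eq_getElem hj]
  obtain ⟨hmax, k, hk, hidx⟩ := pvScan_spec (pvCol rest j) r0[j]
  simp only [Function.comp, hget, hcol, hmax, hidx, Option.getD_some, hk]
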